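-- pv_equiv track=rewrite | github.com/fabiohk/lar | codesignal/arcade-universe/the-core/labyrinth-of-nested-loops/weak_numbers.py | solution
-- ===== SOURCE A (Python) =====
-- from collections import defaultdict
-- from typing import List, Mapping
--
-- def solution(n: int) -> List[int]:
--     divisors_map = {}
--     weakness_map = defaultdict(lambda: 0)
--
--     for i in inclusive_range(1, n):
--         divisors_map[i] = count_divisors(i)
--         weakness = calculate_weakness(i, divisors_map)
--         weakness_map[weakness] += 1
--
--     weakest = calculate_weakest(weakness_map)
--     weakness_of_weakest = weakness_map[weakest]
--
--     return [weakest, weakness_map[weakest]]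
--
-- def inclusive_range(start: int, stop: int, step: int = 1):
--     return range(start, stop + 1, step)
--
-- def count_divisors(n: int) -> int:
--     divisors_counter = 0
--
--     for i in range(1, n + 1):
--         if n % i == 0:
--             divisors_counter += 1
--
--     return divisors_counter
--
-- def calculate_weakness(n: int, divisors_map: Mapping[int, int]) -> int:
--     divisors = divisors_map[n]
--     weakness = 0
--
--     for k in divisors_map.keys():
--         if k >= n:
--             break
--         if divisors_map[k] > divisors:
--             weakness += 1
--
--     return weakness
--
-- def calculate_weakest(weakness_map: Mapping[int, int]) -> int:
--     return sorted(weakness_map.keys())[-1]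
-- ===== SOURCE B (Python) =====
-- from typing import List
--
--
-- def solution(n: int) -> List[int]:
--     # Divisor counts for 1..n via a sieve (one pass over multiples), then
--     # weaknesses collected in a plain list: answer = [max weakness, its multiplicity].
--     d = [0] * (n + 1)
--     for k in range(1, n + 1):
--         for m in range(k, n + 1, k):
--             d[m] += 1
--     weaknesses = []
--     for i in range(1, n + 1):
--         w = 0
--         for dj in d[1:i]:
--             if dj > d[i]:
--                 w += 1
--         weaknesses.append(w)
--     best = max(weaknesses)
--     return [best, weaknesses.count(best)]
-- ===== Notes on version B (the rewrite author's own statement) =====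
-- stated objective: alternative
-- what changed: B counts divisors for all of 1..n with a single sieve over multiples (instead of per-number trial division), keeps the weakness values in a plain list, and gets the answer with max()/list.count() instead of a frequency dict whose keys are sorted.
-- outside the precondition, e.g. on solution(0): A raises IndexError, B raises ValueError
import Mathlib
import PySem

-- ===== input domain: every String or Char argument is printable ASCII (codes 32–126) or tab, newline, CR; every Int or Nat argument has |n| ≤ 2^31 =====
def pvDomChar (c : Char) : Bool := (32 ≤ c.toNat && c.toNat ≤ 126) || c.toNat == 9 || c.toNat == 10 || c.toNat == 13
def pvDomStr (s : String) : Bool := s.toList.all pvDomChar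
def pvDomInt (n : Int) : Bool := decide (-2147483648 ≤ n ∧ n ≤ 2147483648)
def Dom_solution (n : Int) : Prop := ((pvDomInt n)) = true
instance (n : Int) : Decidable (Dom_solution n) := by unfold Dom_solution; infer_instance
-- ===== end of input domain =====

-- B replaces A's per-number trial-division divisor counting by one sieve over multiples and the
-- frequency-dict + sorted-keys finish by max()/count() on a plain list of weaknesses (objective: alternative).
-- Equivalence is proved for n ≥ 1 (Pre_); for n ≤ 0 both Pythons raise (A: IndexError, B: ValueError).

-- ===== PORT A =====
-- count_divisors(n)
def countDivisors (n : Int) : Int :=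
  (PySem.List.pyRange 1 (n + 1) 1).foldl
    (fun acc i => if PySem.Int.mod n i == 0 then acc + 1 else acc) 0

-- the 'for k in divisors_map.keys(): …' loop of calculate_weakness, with its break (k ≥ nn).
-- It walks the dict's own keys in order; divisors_map[k] is read off the traversed (key, value) pair —
-- exact, since a dict's keys are unique and the lookup of a traversed key never misses.
def cwLoop (nn divs : Int) : List (Int × Int) → Int → Int
  | [], acc => acc
  | p :: ps, acc =>
      if p.1 ≥ nn then acc
      else cwLoop nn divs ps (if p.2 > divs then acc + 1 else acc)

-- calculate_weakness(n, divisors_map); divisors_map[n] is present when called (inserted just before), getD exact.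
def calculateWeakness (nn : Int) (dm : PySem.Dict Int Int) : Int :=
  cwLoop nn (dm.getD nn 0) dm.items 0

-- solution(n); calculate_weakest's sorted(keys)[-1] is pyGetD … (-1) 0: for n ≥ 1 the list is nonempty
-- (n ≤ 0, where Python raises IndexError, is excluded by Pre_); weakness_map is a defaultdict(int): getD … 0.
def solution (n : Int) : List Int :=
  let st := (PySem.List.pyRange 1 (n + 1) 1).foldl
    (fun (st : PySem.Dict Int Int × PySem.Dict Int Int) i =>
      let dm := st.1.insert i (countDivisors i)
      let w := calculateWeakness i dm
      (dm, st.2.modify w 0 (· + 1)))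
    (PySem.Dict.empty, PySem.Dict.empty)
  let weakest := PySem.List.pyGetD (PySem.List.sorted st.2.keys (fun x => x) false) (-1) 0
  [weakest, st.2.getD weakest 0]

-- ===== PORT B =====
-- Source B: sieve the divisor counts d[1..n], list the weaknesses, finish with max/count.
-- d[m] indices are all in range for n ≥ 1 (Pre_), so pyGetD/pySetD are exact; max(weaknesses)
-- on the nonempty list is (max? …).getD 0.
def solution_alt (n : Int) : List Int :=
  let d := (PySem.List.pyRange 1 (n + 1) 1).foldl
    (fun d k => (PySem.List.pyRange k (n + 1) k).foldl
      (fun d m => PySem.List.pySetD d m (PySem.List.pyGetD d m 0 + 1)) d)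
    (PySem.List.pyRepeat [(0 : Int)] (n + 1))
  let ws := (PySem.List.pyRange 1 (n + 1) 1).foldl
    (fun ws i => ws ++ [(PySem.List.slice d (some 1) (some i)).foldl
      (fun w dj => if dj > PySem.List.pyGetD d i 0 then w + 1 else w) 0])
    ([] : List Int)
  let best := (PySem.List.max? ws (fun x => x)).getD 0
  [best, (PySem.List.count ws best : Int)]

-- ===== PRECONDITION & SPEC =====
-- Pre_ excludes exactly n ≤ 0, where A raises IndexError (sorted([])[-1]).
def Pre_solution (n : Int) : Prop := 1 ≤ n
instance (n : Int) : Decidable (Pre_solution n) := by unfold Pre_solution; infer_instance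
def pvWitness_solution : Int := (3)
def Spec_solution (n : Int) (out : List Int) : Prop := out = solution_alt n
instance (n : Int) (out : List Int) : Decidable (Spec_solution n out) := by unfold Spec_solution; infer_instance

-- ===== CLAIM (what is proved, stated in full; the proofs are below) =====
def Claim_equal_solution : Prop := ∀ (n : Int), Dom_solution n → Pre_solution n → Spec_solution n (solution n)

-- ===== LEMMAS AND PROOFS =====

-- the weakness of i, and the list of weaknesses of 1..n: the common value both pipelines compute
def wSpec (i : Int) : Int :=
  ((PySem.List.pyRange 1 i 1).countP (fun k => decide (countDivisors k > countDivisors i)) : Int)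

def wsSpec (n : Int) : List Int := (PySem.List.pyRange 1 (n + 1) 1).map wSpec

lemma countDivisors_eq_countP (m : Int) :
    countDivisors m = ((PySem.List.pyRange 1 (m + 1) 1).countP (fun k => decide (k ∣ m)) : Int) := by
  unfold countDivisors
  rw [PySem.List.foldl_if_add_one]
  rw [List.countP_congr (q := fun k => decide (k ∣ m)) ?_]
  · simp
  · intro a _
    simp [PySem.Int.mod_eq_zero_iff_dvd]

-- reading a cell after a set, Int indices
lemma pyGetD_pySetD_int (xs : List Int) {m j : Int} (v : Int)
    (h0 : 0 ≤ m) (h1 : m < (xs.length : Int)) (hj : 0 ≤ j) :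
    PySem.List.pyGetD (PySem.List.pySetD xs m v) j 0 = if j = m then v else PySem.List.pyGetD xs j 0 := by
  have hm : m = (m.toNat : Int) := (Int.toNat_of_nonneg h0).symm
  have hjn : j = (j.toNat : Int) := (Int.toNat_of_nonneg hj).symm
  rw [hm, hjn, PySem.List.pyGetD_pySetD_natCast xs m.toNat j.toNat v 0 (by omega)]
  by_cases h : j = m
  · rw [if_pos (by omega), if_pos (by omega)]
  · rw [if_neg (by omega), if_neg (by omega)]

-- a pass that increments the cells listed in L (all nonneg, in range): each cell grows by its multiplicity in L
lemma fold_incr (L : List Int) (d : List Int)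
    (hL : ∀ m ∈ L, 0 ≤ m ∧ m < (d.length : Int)) :
    (L.foldl (fun d m => PySem.List.pySetD d m (PySem.List.pyGetD d m 0 + 1)) d).length = d.length ∧
    ∀ j : Int, 0 ≤ j →
      PySem.List.pyGetD (L.foldl (fun d m => PySem.List.pySetD d m (PySem.List.pyGetD d m 0 + 1)) d) j 0
        = PySem.List.pyGetD d j 0 + (PySem.List.count L j : Int) := by
  induction L generalizing d with
  | nil => simp [PySem.List.count]
  | cons m L ih =>
    have hm := hL m (by simp)
    have hlen : (PySem.List.pySetD d m (PySem.List.pyGetD d m 0 + 1)).length = d.length :=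
      PySem.List.length_pySetD d m _
    obtain ⟨ih1, ih2⟩ := ih (PySem.List.pySetD d m (PySem.List.pyGetD d m 0 + 1))
      (by intro x hx; rw [hlen]; exact hL x (by simp [hx]))
    refine ⟨by simp [ih1, hlen], ?_⟩
    intro j hj
    rw [List.foldl_cons, ih2 j hj, pyGetD_pySetD_int d _ hm.1 hm.2 hj]
    simp only [PySem.List.count, List.count_cons]
    by_cases h : j = m
    · rw [if_pos h]
      simp [h]
      push_cast
      ring
    · rw [if_neg h]
      simp [List.count, Ne.symm h]

-- multiplicity of j in range(k, n+1, k)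
lemma count_pyRange_step (k n j : Int) (hk : 0 < k) (hj : 1 ≤ j) :
    (PySem.List.count (PySem.List.pyRange k (n + 1) k) j : Int)
      = if k ∣ j ∧ j ≤ n then 1 else 0 := by
  have hnd : (PySem.List.pyRange k (n + 1) k).Nodup := by
    rw [PySem.List.pyRange_of_pos _ _ hk]
    refine List.Nodup.map ?_ (List.nodup_range)
    intro a b hab
    simp only at hab
    have : (a : Int) = b := mul_left_cancel₀ (ne_of_gt hk) (by omega : k * (a:Int) = k * b)
    exact_mod_cast this
  have hmem : j ∈ PySem.List.pyRange k (n + 1) k ↔ (k ∣ j ∧ j ≤ n) := by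
    rw [PySem.List.mem_pyRange_iff_of_pos hk]
    constructor
    · rintro ⟨h1, h2, h3⟩
      refine ⟨?_, by omega⟩
      have hj' : j = (j - k) + k := by ring
      rw [hj']
      exact dvd_add h3 dvd_rfl
    · rintro ⟨h1, h2⟩
      exact ⟨Int.le_of_dvd (by omega) h1, by omega, dvd_sub h1 dvd_rfl⟩
  by_cases h : k ∣ j ∧ j ≤ n
  · rw [if_pos h]
    have := List.count_eq_one_of_mem hnd (hmem.mpr h)
    simp [PySem.List.count, this]
  · rw [if_neg h]
    have := List.count_eq_zero_of_not_mem (fun hc => h (hmem.mp hc))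
    simp [PySem.List.count, this]

-- the sieve: after the outer loop over L, cell j has grown by the number of k ∈ L that divide j (j ≤ n)
lemma sieve_fold (n : Int) (L : List Int) (d : List Int)
    (hlen : (d.length : Int) = n + 1) (hL : ∀ k ∈ L, 1 ≤ k) :
    (L.foldl (fun d k => (PySem.List.pyRange k (n + 1) k).foldl
        (fun d m => PySem.List.pySetD d m (PySem.List.pyGetD d m 0 + 1)) d) d).length = d.length ∧
    ∀ j : Int, 1 ≤ j → j ≤ n →
      PySem.List.pyGetD (L.foldl (fun d k => (PySem.List.pyRange k (n + 1) k).foldl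
          (fun d m => PySem.List.pySetD d m (PySem.List.pyGetD d m 0 + 1)) d) d) j 0
        = PySem.List.pyGetD d j 0 + (L.countP (fun k => decide (k ∣ j)) : Int) := by
  induction L generalizing d with
  | nil => simp
  | cons k L ih =>
    have hk : 1 ≤ k := hL k (by simp)
    have hmemr : ∀ m ∈ PySem.List.pyRange k (n + 1) k, 0 ≤ m ∧ m < (d.length : Int) := by
      intro m hm
      rw [PySem.List.mem_pyRange_iff_of_pos (by omega)] at hm
      omega
    obtain ⟨i1, i2⟩ := fold_incr (PySem.List.pyRange k (n + 1) k) d hmemr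
    obtain ⟨ih1, ih2⟩ := ih ((PySem.List.pyRange k (n + 1) k).foldl
        (fun d m => PySem.List.pySetD d m (PySem.List.pyGetD d m 0 + 1)) d)
      (by rw [i1]; exact hlen) (fun x hx => hL x (by simp [hx]))
    refine ⟨by rw [List.foldl_cons, ih1, i1], ?_⟩
    intro j hj1 hjn
    rw [List.foldl_cons, ih2 j hj1 hjn, i2 j (by omega), count_pyRange_step k n j (by omega) hj1]
    rw [List.countP_cons]
    by_cases h : k ∣ j
    · rw [if_pos ⟨h, hjn⟩]
      simp [h]
      ring
    · rw [if_neg (by tauto)]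
      simp [h]

-- B's sieve array holds the divisor counts
lemma sieve_spec (n : Int) (j : Int) (hj1 : 1 ≤ j) (hjn : j ≤ n) :
    PySem.List.pyGetD
      ((PySem.List.pyRange 1 (n + 1) 1).foldl
        (fun d k => (PySem.List.pyRange k (n + 1) k).foldl
          (fun d m => PySem.List.pySetD d m (PySem.List.pyGetD d m 0 + 1)) d)
        (PySem.List.pyRepeat [(0 : Int)] (n + 1))) j 0 = countDivisors j := by
  have hrep : PySem.List.pyRepeat [(0 : Int)] (n + 1) = List.replicate (n+1).toNat 0 :=
    PySem.List.pyRepeat_singleton 0 (n+1)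
  have hlen : ((PySem.List.pyRepeat [(0 : Int)] (n + 1)).length : Int) = n + 1 := by
    rw [hrep]; simp; omega
  obtain ⟨_, h2⟩ := sieve_fold n (PySem.List.pyRange 1 (n + 1) 1) _ hlen
    (fun x hx => by rw [PySem.List.mem_pyRange_one] at hx; omega)
  rw [h2 j hj1 hjn]
  have hz : PySem.List.pyGetD (PySem.List.pyRepeat [(0 : Int)] (n + 1)) j 0 = 0 := by
    rw [hrep]
    rw [← Int.toNat_of_nonneg (by omega : (0:Int) ≤ j), PySem.List.pyGetD_natCast]
    simp [List.getD]
  rw [hz, countDivisors_eq_countP]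
  rw [PySem.List.pyRange_one_append 1 (j+1) (n+1) (by omega) (by omega), List.countP_append]
  have hz2 : List.countP (fun k => decide (k ∣ j)) (PySem.List.pyRange (j+1) (n+1)) = 0 := by
    rw [List.countP_eq_zero]
    intro a ha
    rw [PySem.List.mem_pyRange_one] at ha
    simp only [decide_eq_true_eq]
    intro hd
    have := Int.le_of_dvd (by omega) hd
    omega
  rw [hz2]
  push_cast
  ring

-- A's break-loop over a prefix of keys all below the bound
lemma cwLoop_append (nn divs : Int) (L ks : List (Int × Int))
    (h : ∀ p ∈ L, p.1 < nn) (acc : Int) :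
    cwLoop nn divs (L ++ ks) acc
      = cwLoop nn divs ks (acc + (L.countP (fun p => decide (p.2 > divs)) : Int)) := by
  induction L generalizing acc with
  | nil => simp [cwLoop]
  | cons p L ih =>
    have hp : p.1 < nn := h p (by simp)
    rw [List.cons_append]
    rw [show cwLoop nn divs (p :: (L ++ ks)) acc
        = cwLoop nn divs (L ++ ks) (if p.2 > divs then acc + 1 else acc) by
      simp [cwLoop, not_le.mpr hp]]
    rw [ih (fun x hx => h x (by simp [hx]))]
    congr 1
    rw [List.countP_cons]
    by_cases hc : p.2 > divs
    · simp [hc]; ring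
    · simp [hc]

lemma calculateWeakness_eq (i : Int) (hi : 1 ≤ i) (dm : PySem.Dict Int Int)
    (hitems : dm.items = (PySem.List.pyRange 1 (i + 1) 1).map (fun k => (k, countDivisors k))) :
    calculateWeakness i dm = wSpec i := by
  have hkeys : dm.keys = PySem.List.pyRange 1 (i + 1) 1 := by
    simp only [PySem.Dict.keys, hitems, List.map_map]
    simp [Function.comp_def]
  have hnd : dm.keys.Nodup := by rw [hkeys]; exact PySem.List.nodup_pyRange_one 1 (i+1)
  have hgi : dm.getD i 0 = countDivisors i := by
    refine PySem.Dict.getD_of_mem_items dm ?_ hnd 0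
    rw [hitems]
    exact List.mem_map_of_mem (PySem.List.mem_pyRange_one.mpr ⟨hi, by omega⟩)
  unfold calculateWeakness
  rw [hitems, show PySem.List.pyRange 1 (i+1) 1 = PySem.List.pyRange 1 i 1 ++ [i] from
    PySem.List.pyRange_one_succ_right hi]
  rw [List.map_append]
  rw [cwLoop_append _ _ _ _ (fun p hp => by
    obtain ⟨k, hk, rfl⟩ := List.mem_map.mp hp
    rw [PySem.List.mem_pyRange_one] at hk
    simpa using hk.2)]
  rw [show ∀ acc : Int, cwLoop i (dm.getD i 0) (List.map (fun k => (k, countDivisors k)) [i]) acc = acc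
      from fun acc => by simp [cwLoop]]
  rw [List.countP_map]
  have hpq : ∀ a ∈ PySem.List.pyRange 1 i 1,
      (((fun p : Int × Int => decide (p.2 > dm.getD i 0)) ∘ (fun k => (k, countDivisors k))) a = true
        ↔ (fun k => decide (countDivisors k > countDivisors i)) a = true) := by
    intro a _
    simp [Function.comp_apply, hgi]
  rw [List.countP_congr hpq]
  unfold wSpec
  ring

-- A's main fold, characterised
lemma A_fold (t : Nat) :
    ((PySem.List.pyRange 1 (1 + (t : Int)) 1).foldl
      (fun (st : PySem.Dict Int Int × PySem.Dict Int Int) i =>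
        let dm := st.1.insert i (countDivisors i)
        let w := calculateWeakness i dm
        (dm, st.2.modify w 0 (· + 1)))
      (PySem.Dict.empty, PySem.Dict.empty)).1.items
        = (PySem.List.pyRange 1 (1 + (t : Int)) 1).map (fun k => (k, countDivisors k)) ∧
    ((PySem.List.pyRange 1 (1 + (t : Int)) 1).foldl
      (fun (st : PySem.Dict Int Int × PySem.Dict Int Int) i =>
        let dm := st.1.insert i (countDivisors i)
        let w := calculateWeakness i dm
        (dm, st.2.modify w 0 (· + 1)))
      (PySem.Dict.empty, PySem.Dict.empty)).2
        = PySem.Dict.counter ((PySem.List.pyRange 1 (1 + (t : Int)) 1).map wSpec) := by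
  induction t with
  | zero =>
    rw [show (1 + ((0:Nat) : Int)) = 1 by norm_num, PySem.List.pyRange_one_eq_nil (le_refl 1)]
    constructor <;> rfl
  | succ t ih =>
    obtain ⟨ih1, ih2⟩ := ih
    have hsplit : PySem.List.pyRange 1 (1 + ((t+1 : Nat) : Int)) 1
        = PySem.List.pyRange 1 (1 + (t : Int)) 1 ++ [1 + (t : Int)] := by
      push_cast
      rw [show (1 + ((t:Int) + 1)) = (1 + (t:Int)) + 1 by ring]
      exact PySem.List.pyRange_one_succ_right (by omega)
    rw [hsplit, List.foldl_append, List.map_append]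
    set st := ((PySem.List.pyRange 1 (1 + (t : Int)) 1).foldl
      (fun (st : PySem.Dict Int Int × PySem.Dict Int Int) i =>
        let dm := st.1.insert i (countDivisors i)
        let w := calculateWeakness i dm
        (dm, st.2.modify w 0 (· + 1)))
      (PySem.Dict.empty, PySem.Dict.empty)) with hst
    have hnc : st.1.contains (1 + (t : Int)) = false := by
      by_contra hc
      have hc' : st.1.contains (1 + (t : Int)) = true := by
        cases hcc : st.1.contains (1 + (t : Int)) <;> simp_all
      rw [PySem.Dict.contains_iff_mem_keys] at hc'
      have hmem : (1 + (t : Int)) ∈ st.1.keys := hc'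
      simp only [PySem.Dict.keys, ih1, List.map_map] at hmem
      have hmem' : (1 + (t : Int)) ∈ PySem.List.pyRange 1 (1 + (t : Int)) 1 := by
        simpa using hmem
      rw [PySem.List.mem_pyRange_one] at hmem'
      omega
    have hins : (st.1.insert (1 + (t : Int)) (countDivisors (1 + (t : Int)))).items
        = (PySem.List.pyRange 1 (1 + (t : Int)) 1).map (fun k => (k, countDivisors k))
          ++ [(1 + (t : Int), countDivisors (1 + (t : Int)))] := by
      rw [PySem.Dict.items_insert_of_not_contains _ _ hnc, ih1]
    have hw : calculateWeakness (1 + (t : Int)) (st.1.insert (1 + (t : Int)) (countDivisors (1 + (t : Int))))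
        = wSpec (1 + (t : Int)) := by
      apply calculateWeakness_eq _ (by omega)
      rw [hins, PySem.List.pyRange_one_succ_right (by omega : (1:Int) ≤ 1 + (t:Int))]
      simp
    simp only [List.foldl_cons, List.foldl_nil]
    constructor
    · rw [hins]; simp
    · rw [hw, ih2, List.map_append, show List.map wSpec [1 + (t:Int)] = [wSpec (1 + (t:Int))] from rfl,
          PySem.Dict.counter_append_singleton]

-- last of the sorted distinct values = first maximum of the list
lemma maxAgree (ws : List Int) (h : ws ≠ []) :
    PySem.List.pyGetD (PySem.List.sorted (PySem.Set.ofList ws) (fun x => x) false) (-1) 0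
      = (PySem.List.max? ws (fun x => x)).getD 0 := by
  obtain ⟨m, hm⟩ : ∃ m, PySem.List.max? ws (fun x => x) = some m := by
    cases hc : PySem.List.max? ws (fun x => x) with
    | none => exact absurd ((PySem.List.max?_eq_none_iff ws _).mp hc) h
    | some m => exact ⟨m, rfl⟩
  have hLmem : ∀ x : Int, (x ∈ PySem.List.sorted (PySem.Set.ofList ws) (fun x => x) false) ↔ x ∈ ws := by
    intro x
    rw [(PySem.List.sorted_perm (PySem.Set.ofList ws) (fun x => x) false).mem_iff]
    exact PySem.Set.mem_ofList (xs := ws) (y := x)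
  have hL : PySem.List.sorted (PySem.Set.ofList ws) (fun x => x) false ≠ [] := by
    intro hc
    obtain ⟨x, hx⟩ := List.exists_mem_of_ne_nil ws h
    exact absurd ((hLmem x).mpr hx) (by rw [hc]; simp)
  rw [PySem.List.pyGetD_neg_one _ _ hL, hm]
  have hlen0 : 0 < (PySem.List.sorted (PySem.Set.ofList ws) (fun x => x) false).length :=
    List.length_pos_of_ne_nil hL
  have h1 : (PySem.List.sorted (PySem.Set.ofList ws) (fun x => x) false).getLast hL ≤ m :=
    PySem.List.max?_isMax hm _ ((hLmem _).mp (List.getLast_mem hL))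
  have h2 : m ≤ (PySem.List.sorted (PySem.Set.ofList ws) (fun x => x) false).getLast hL := by
    obtain ⟨p, hp, hpe⟩ := List.mem_iff_getElem.mp ((hLmem m).mpr (PySem.List.max?_mem hm))
    rw [List.getLast_eq_getElem]
    calc m = (PySem.List.sorted (PySem.Set.ofList ws) (fun x => x) false)[p] := hpe.symm
    _ ≤ (PySem.List.sorted (PySem.Set.ofList ws) (fun x => x) false)[(PySem.List.sorted (PySem.Set.ofList ws) (fun x => x) false).length - 1] :=
      PySem.List.sorted_id_getElem_mono _ (by omega) (by omega)
  exact (le_antisymm h1 h2).trans rfl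

lemma slice_eq_map (d : List Int) (n i : Int) (h1 : 1 ≤ i) (h2 : i ≤ n)
    (hlen : (d.length : Int) = n + 1) :
    PySem.List.slice d (some 1) (some i)
      = (PySem.List.pyRange 1 i 1).map (fun j => PySem.List.pyGetD d j 0) := by
  rw [PySem.List.slice_toNat d (by omega) (by omega)]
  apply List.ext_getElem
  · simp only [List.length_take, List.length_drop, PySem.List.length_pyRange_one, Int.toNat_one,
      List.length_map]
    omega
  · intro k hk1 hk2
    simp only [List.length_take, List.length_drop, PySem.List.length_pyRange_one, Int.toNat_one,
      List.length_map] at hk1 hk2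
    rw [List.getElem_take, List.getElem_drop]
    rw [List.getElem_map, PySem.List.getElem_pyRange_one]
    rw [PySem.List.pyGetD_eq_getElem d 0 (by omega) (by push_cast; omega)]
    congr 1

lemma solution_alt_eq (n : Int) (hn : 1 ≤ n) :
    solution_alt n = [(PySem.List.max? (wsSpec n) (fun x => x)).getD 0,
                      (PySem.List.count (wsSpec n) ((PySem.List.max? (wsSpec n) (fun x => x)).getD 0) : Int)] := by
  unfold solution_alt wsSpec
  have hdlen : (((PySem.List.pyRange 1 (n + 1) 1).foldl
      (fun d k => (PySem.List.pyRange k (n + 1) k).foldl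
        (fun d m => PySem.List.pySetD d m (PySem.List.pyGetD d m 0 + 1)) d)
      (PySem.List.pyRepeat [(0 : Int)] (n + 1))).length : Int) = n + 1 := by
    have hrep : ((PySem.List.pyRepeat [(0 : Int)] (n + 1)).length : Int) = n + 1 := by
      rw [PySem.List.pyRepeat_singleton]; simp; omega
    obtain ⟨hl, _⟩ := sieve_fold n (PySem.List.pyRange 1 (n + 1) 1) _ hrep
      (fun x hx => by rw [PySem.List.mem_pyRange_one] at hx; omega)
    rw [hl]; exact hrep
  have hws : (PySem.List.pyRange 1 (n + 1) 1).foldl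
      (fun ws i => ws ++ [(PySem.List.slice ((PySem.List.pyRange 1 (n + 1) 1).foldl
            (fun d k => (PySem.List.pyRange k (n + 1) k).foldl
              (fun d m => PySem.List.pySetD d m (PySem.List.pyGetD d m 0 + 1)) d)
            (PySem.List.pyRepeat [(0 : Int)] (n + 1))) (some 1) (some i)).foldl
        (fun w dj => if dj > PySem.List.pyGetD ((PySem.List.pyRange 1 (n + 1) 1).foldl
            (fun d k => (PySem.List.pyRange k (n + 1) k).foldl
              (fun d m => PySem.List.pySetD d m (PySem.List.pyGetD d m 0 + 1)) d)
            (PySem.List.pyRepeat [(0 : Int)] (n + 1))) i 0 then w + 1 else w) 0])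
      ([] : List Int) = (PySem.List.pyRange 1 (n + 1) 1).map wSpec := by
    rw [PySem.List.foldl_append_singleton_eq_map]
    rw [List.nil_append]
    apply List.map_congr_left
    intro i hi
    rw [PySem.List.mem_pyRange_one] at hi
    rw [PySem.List.foldl_ite_add_one]
    rw [slice_eq_map _ n i (by omega) (by omega) hdlen, List.countP_map]
    rw [List.countP_congr (q := fun k => decide (countDivisors k > countDivisors i)) ?_]
    · unfold wSpec; ring
    · intro j hj
      rw [PySem.List.mem_pyRange_one] at hj
      simp only [Function.comp_apply, decide_eq_true_eq]
      rw [sieve_spec n j (by omega) (by omega), sieve_spec n i (by omega) (by omega)]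
  dsimp only
  rw [hws]

lemma solution_eq (n : Int) (hn : 1 ≤ n) :
    solution n = [(PySem.List.max? (wsSpec n) (fun x => x)).getD 0,
                  (PySem.List.count (wsSpec n) ((PySem.List.max? (wsSpec n) (fun x => x)).getD 0) : Int)] := by
  unfold solution wsSpec
  obtain ⟨h1, h2⟩ := A_fold n.toNat
  rw [show (1 + ((n.toNat : Nat) : Int)) = n + 1 by omega] at h1 h2
  have hne : (PySem.List.pyRange 1 (n + 1) 1).map wSpec ≠ [] := by
    intro hc
    rw [List.map_eq_nil_iff] at hc
    have h1m : (1 : Int) ∈ PySem.List.pyRange 1 (n + 1) 1 :=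
      PySem.List.mem_pyRange_one.mpr ⟨le_refl 1, by omega⟩
    rw [hc] at h1m
    simp at h1m
  dsimp only
  rw [h2, PySem.Dict.keys_counter, maxAgree _ hne, PySem.Dict.getD_counter]
  simp [PySem.List.count]


-- ===== VERDICT (by name: the statement is the Claim_ definition above) =====
theorem solution_spec : Claim_equal_solution := by
  intro n _ hpre
  unfold Spec_solution
  rw [solution_eq n hpre, solution_alt_eq n hpre]
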